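-- pv_equiv track=rewrite | github.com/epilectrik/voynich | archive/scripts/bvs_batch_vs_sequential.py | categorize_a_lines
-- ===== SOURCE A (Python) =====
-- def categorize_a_lines(a_line_lengths):
--     """Categorize A lines into SHORT/MEDIUM/LONG."""
--     categories = {'SHORT': [], 'MEDIUM': [], 'LONG': []}
--
--     for entry in a_line_lengths:
--         length = entry['length']
--         if length <= 3:
--             categories['SHORT'].append(entry)
--         elif length <= 7:
--             categories['MEDIUM'].append(entry)
--         else:
--             categories['LONG'].append(entry)
--
--     return categories
-- ===== SOURCE B (Python) =====
-- def categorize_a_lines(a_line_lengths):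
--     """Categorize A lines into SHORT/MEDIUM/LONG (three filtering passes)."""
--     return {
--         'SHORT': [e for e in a_line_lengths if e['length'] <= 3],
--         'MEDIUM': [e for e in a_line_lengths if 3 < e['length'] <= 7],
--         'LONG': [e for e in a_line_lengths if e['length'] > 7],
--     }
-- ===== Notes on version B (the rewrite author's own statement) =====
-- stated objective: alternative
-- what changed: Replaces the single mutating loop with three branches by three independent order-preserving filter passes over the input, one per disjoint length range, assembled directly into the result dict.
import Mathlib
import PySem

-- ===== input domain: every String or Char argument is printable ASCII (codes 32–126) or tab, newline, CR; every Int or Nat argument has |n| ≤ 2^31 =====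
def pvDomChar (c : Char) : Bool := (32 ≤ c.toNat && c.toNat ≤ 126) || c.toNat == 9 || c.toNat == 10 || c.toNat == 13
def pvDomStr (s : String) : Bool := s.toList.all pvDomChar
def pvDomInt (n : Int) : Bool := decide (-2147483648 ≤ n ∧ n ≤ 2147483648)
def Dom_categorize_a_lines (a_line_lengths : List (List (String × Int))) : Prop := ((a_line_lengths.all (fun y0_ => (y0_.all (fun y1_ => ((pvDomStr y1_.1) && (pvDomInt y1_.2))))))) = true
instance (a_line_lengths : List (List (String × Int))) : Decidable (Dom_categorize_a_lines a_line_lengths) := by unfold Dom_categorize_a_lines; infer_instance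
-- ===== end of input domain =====

-- B replaces A's one loop with three branches by three independent filter passes (one per length range); same cost class.

-- entry['length'] : first-match lookup in the association list; Python raises KeyError when absent
-- (those inputs are outside Pre_ below); the .getD 0 default is never reached inside Pre_.
def pvLen (entry : List (String × Int)) : Int := ((entry.find? (fun p => p.1 == "length")).map (·.2)).getD 0

-- ===== PORT A =====
def categorize_a_lines (a_line_lengths : List (List (String × Int))) : List (String × List (List (String × Int))) :=
  let r := a_line_lengths.foldl
    (fun (acc : List (List (String × Int)) × List (List (String × Int)) × List (List (String × Int))) entry =>
      let length := pvLen entry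
      if length ≤ 3 then (acc.1 ++ [entry], acc.2.1, acc.2.2)
      else if length ≤ 7 then (acc.1, acc.2.1 ++ [entry], acc.2.2)
      else (acc.1, acc.2.1, acc.2.2 ++ [entry]))
    ([], [], [])
  [("SHORT", r.1), ("MEDIUM", r.2.1), ("LONG", r.2.2)]

-- ===== PORT B =====
def categorize_a_lines_alt (a_line_lengths : List (List (String × Int))) : List (String × List (List (String × Int))) :=
  [("SHORT",  a_line_lengths.filter (fun e => decide (pvLen e ≤ 3))),
   ("MEDIUM", a_line_lengths.filter (fun e => decide (3 < pvLen e ∧ pvLen e ≤ 7))),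
   ("LONG",   a_line_lengths.filter (fun e => decide (7 < pvLen e)))]

-- ===== PRECONDITION & SPEC =====
-- Pre_ excludes exactly the entries with no 'length' key, on which the Python A raises KeyError.
def Pre_categorize_a_lines (a_line_lengths : List (List (String × Int))) : Prop :=
  ∀ e ∈ a_line_lengths, (e.find? (fun p => p.1 == "length")).isSome = true
instance (a_line_lengths : List (List (String × Int))) : Decidable (Pre_categorize_a_lines a_line_lengths) := by unfold Pre_categorize_a_lines; infer_instance

def pvWitness_categorize_a_lines : (List (List (String × Int))) := [[("length", 2)], [("length", 9), ("word", 0)]]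

def Spec_categorize_a_lines (a_line_lengths : List (List (String × Int))) (out : List (String × List (List (String × Int)))) : Prop := out = categorize_a_lines_alt a_line_lengths
instance (a_line_lengths : List (List (String × Int))) (out : List (String × List (List (String × Int)))) : Decidable (Spec_categorize_a_lines a_line_lengths out) := by unfold Spec_categorize_a_lines; infer_instance

-- ===== CLAIM (what is proved, stated in full; the proofs are below) =====
def Claim_equal_categorize_a_lines : Prop := ∀ (a_line_lengths : List (List (String × Int))), Dom_categorize_a_lines a_line_lengths → Pre_categorize_a_lines a_line_lengths → Spec_categorize_a_lines a_line_lengths (categorize_a_lines a_line_lengths)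

-- ===== LEMMAS AND PROOFS =====

-- loop invariant: the fold appends exactly the three filters to the accumulators
theorem categorize_foldl_eq (xs : List (List (String × Int)))
    (s m l : List (List (String × Int))) :
    xs.foldl
      (fun (acc : List (List (String × Int)) × List (List (String × Int)) × List (List (String × Int))) entry =>
        let length := pvLen entry
        if length ≤ 3 then (acc.1 ++ [entry], acc.2.1, acc.2.2)
        else if length ≤ 7 then (acc.1, acc.2.1 ++ [entry], acc.2.2)
        else (acc.1, acc.2.1, acc.2.2 ++ [entry]))
      (s, m, l)
    = (s ++ xs.filter (fun e => decide (pvLen e ≤ 3)),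
       m ++ xs.filter (fun e => decide (3 < pvLen e ∧ pvLen e ≤ 7)),
       l ++ xs.filter (fun e => decide (7 < pvLen e))) := by
  induction xs generalizing s m l with
  | nil => simp
  | cons x xs ih =>
    simp only [List.foldl_cons, List.filter_cons]
    by_cases h1 : pvLen x ≤ 3
    · simp [h1, ih, show ¬ (3 < pvLen x ∧ pvLen x ≤ 7) by omega, show ¬ 7 < pvLen x by omega]
    · by_cases h2 : pvLen x ≤ 7
      · simp [h1, h2, ih, show 3 < pvLen x ∧ pvLen x ≤ 7 by omega]
      · simp [h1, h2, ih, show 7 < pvLen x by omega]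

-- ===== VERDICT (by name: the statement is the Claim_ definition above) =====
theorem categorize_a_lines_spec : Claim_equal_categorize_a_lines := by
  intro xs _ _
  unfold Spec_categorize_a_lines categorize_a_lines categorize_a_lines_alt
  simp [categorize_foldl_eq]
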